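-- pv_equiv track=rewrite | github.com/yuchen818/py-skills | codes/random-test/hw2/4_right-triangle/index.py | is_right_triangle
-- ===== SOURCE A (Python) =====
-- def is_right_triangle(c, y, z):
--   c_squared = c * c
--
--   lower = min(y, z)
--   upper = max(y, z)
--
--   # 由 a 與 b 進行計算遇到符合的就直接返回結果
--   for a in range(lower, upper + 1):
--     for b in range(lower, upper + 1):
--       if a * a + b * b == c_squared:
--         return True
--
--   return False
-- ===== SOURCE B (Python) =====
-- def is_right_triangle(c, y, z):
--     target = c * c
--     seen = set()
--     for a in range(min(y, z), max(y, z) + 1):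
--         seen.add(a * a)
--         if target - a * a in seen:
--             return True
--     return False
-- ===== Notes on version B (the rewrite author's own statement) =====
-- stated objective: faster
-- what changed: B replaces A's nested scan over (a, b) with the classic single-pass two-sum pattern: it walks the range once, adding each square to a set and testing whether the complementary square has been seen, which is correct because a*a + b*b = c*c is symmetric in a and b; O(n^2) becomes O(n).
import Mathlib
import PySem

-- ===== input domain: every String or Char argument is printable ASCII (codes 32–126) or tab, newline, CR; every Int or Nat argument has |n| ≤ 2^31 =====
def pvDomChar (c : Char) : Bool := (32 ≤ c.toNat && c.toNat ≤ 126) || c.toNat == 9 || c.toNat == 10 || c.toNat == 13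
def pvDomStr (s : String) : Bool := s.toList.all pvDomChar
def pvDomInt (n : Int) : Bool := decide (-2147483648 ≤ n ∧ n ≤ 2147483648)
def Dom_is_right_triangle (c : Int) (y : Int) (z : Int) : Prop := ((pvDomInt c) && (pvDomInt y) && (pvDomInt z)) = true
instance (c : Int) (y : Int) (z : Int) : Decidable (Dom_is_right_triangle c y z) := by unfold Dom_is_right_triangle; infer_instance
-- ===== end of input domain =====

-- B replaces A's nested scan with a one-pass two-sum over a set of seen squares (correct by symmetry of a*a + b*b).
-- ===== PORT A =====
-- inner 'for b in range(lower, upper+1): if a*a+b*b==c_squared: return True' (early exit)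
def pvLoopB (c_squared : Int) (a : Int) (b : Int) (upper : Int) : Bool :=
  if b ≤ upper then (a * a + b * b == c_squared) || pvLoopB c_squared a (b + 1) upper
  else false
termination_by (upper + 1 - b).toNat
decreasing_by omega

-- outer 'for a in range(lower, upper+1): …' (early exit)
def pvLoopA (c_squared : Int) (a : Int) (lower : Int) (upper : Int) : Bool :=
  if a ≤ upper then pvLoopB c_squared a lower upper || pvLoopA c_squared (a + 1) lower upper
  else false
termination_by (upper + 1 - a).toNat
decreasing_by omega

def is_right_triangle (c : Int) (y : Int) (z : Int) : Bool :=
  let c_squared := c * c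
  let lower := min y z
  let upper := max y z
  pvLoopA c_squared lower lower upper

-- ===== PORT B =====
-- 'for a in range(...): seen.add(a*a); if target - a*a in seen: return True' (early exit)
def pvAltLoop (target : Int) (upper : Int) (seen : PySem.Set Int) (a : Int) : Bool :=
  if a ≤ upper then
    let seen' := PySem.Set.add seen (a * a)
    if PySem.Set.contains seen' (target - a * a) then true
    else pvAltLoop target upper seen' (a + 1)
  else false
termination_by (upper + 1 - a).toNat
decreasing_by omega

def is_right_triangle_alt (c : Int) (y : Int) (z : Int) : Bool :=
  let target := c * c
  pvAltLoop target (max y z) PySem.Set.empty (min y z)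

-- ===== PRECONDITION & SPEC =====
def Spec_is_right_triangle (c : Int) (y : Int) (z : Int) (out : Bool) : Prop := out = is_right_triangle_alt c y z
instance (c : Int) (y : Int) (z : Int) (out : Bool) : Decidable (Spec_is_right_triangle c y z out) := by unfold Spec_is_right_triangle; infer_instance

-- ===== CLAIM =====
def Claim_equal_is_right_triangle : Prop := ∀ (c : Int) (y : Int) (z : Int), Dom_is_right_triangle c y z → Spec_is_right_triangle c y z (is_right_triangle c y z)

-- ===== LEMMAS AND PROOFS =====
lemma pvLoopB_iff (c2 a b upper : Int) :
    pvLoopB c2 a b upper = true ↔ ∃ x, b ≤ x ∧ x ≤ upper ∧ a * a + x * x = c2 := by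
  fun_induction pvLoopB with
  | case1 b h ih =>
    simp only [Bool.or_eq_true, beq_iff_eq, ih]
    constructor
    · rintro (h1 | ⟨x, hx1, hx2, hx3⟩)
      · exact ⟨b, le_refl b, h, h1⟩
      · exact ⟨x, by omega, hx2, hx3⟩
    · rintro ⟨x, hx1, hx2, hx3⟩
      by_cases hxb : x = b
      · subst hxb; exact Or.inl hx3
      · exact Or.inr ⟨x, by omega, hx2, hx3⟩
  | case2 b h =>
    simp only [Bool.false_eq_true, false_iff]
    rintro ⟨x, hx1, hx2, _⟩; omega

lemma pvLoopA_iff (c2 a lower upper : Int) :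
    pvLoopA c2 a lower upper = true ↔
      ∃ x, a ≤ x ∧ x ≤ upper ∧ ∃ b, lower ≤ b ∧ b ≤ upper ∧ x * x + b * b = c2 := by
  fun_induction pvLoopA with
  | case1 a h ih =>
    simp only [Bool.or_eq_true, ih, pvLoopB_iff]
    constructor
    · rintro (⟨x, hx1, hx2, hx3⟩ | ⟨x, hx1, hx2, b, hb1, hb2, hb3⟩)
      · exact ⟨a, le_refl a, h, x, hx1, hx2, hx3⟩
      · exact ⟨x, by omega, hx2, b, hb1, hb2, hb3⟩
    · rintro ⟨x, hx1, hx2, b, hb1, hb2, hb3⟩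
      by_cases hxa : x = a
      · subst hxa; exact Or.inl ⟨b, hb1, hb2, hb3⟩
      · exact Or.inr ⟨x, by omega, hx2, b, hb1, hb2, hb3⟩
  | case2 a h =>
    simp only [Bool.false_eq_true, false_iff]
    rintro ⟨x, hx1, hx2, _⟩; omega

lemma pvAltLoop_iff (target upper : Int) (seen : PySem.Set Int) (a : Int) :
    pvAltLoop target upper seen a = true ↔
      ∃ x, a ≤ x ∧ x ≤ upper ∧
        (target - x * x ∈ seen ∨ ∃ b, a ≤ b ∧ b ≤ x ∧ b * b = target - x * x) := by
  fun_induction pvAltLoop with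
  | case1 seen a h seen' hmem =>
    simp only [true_iff]
    rw [PySem.Set.contains_iff, PySem.Set.mem_add] at hmem
    rcases hmem with hm | hm
    · exact ⟨a, le_refl a, h, Or.inl hm⟩
    · exact ⟨a, le_refl a, h, Or.inr ⟨a, le_refl a, le_refl a, by omega⟩⟩
  | case2 seen a h seen' hmem ih =>
    rw [PySem.Set.contains_iff, PySem.Set.mem_add] at hmem
    push Not at hmem
    rw [ih]
    constructor
    · rintro ⟨x, hx1, hx2, hcase⟩
      refine ⟨x, by omega, hx2, ?_⟩
      rcases hcase with hm | ⟨b, hb1, hb2, hb3⟩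
      · rw [PySem.Set.mem_add] at hm
        rcases hm with hm | hm
        · exact Or.inl hm
        · exact Or.inr ⟨a, le_refl a, by omega, by omega⟩
      · exact Or.inr ⟨b, by omega, hb2, hb3⟩
    · rintro ⟨x, hx1, hx2, hcase⟩
      by_cases hxa : x = a
      · subst hxa
        exfalso
        rcases hcase with hm | ⟨b, hb1, hb2, hb3⟩
        · exact hmem.1 hm
        · have : b = x := by omega
          subst this; exact hmem.2 (by omega)
      · refine ⟨x, by omega, hx2, ?_⟩
        rcases hcase with hm | ⟨b, hb1, hb2, hb3⟩
        · exact Or.inl (by rw [PySem.Set.mem_add]; exact Or.inl hm)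
        · by_cases hba : b = a
          · subst hba
            exact Or.inl (by rw [PySem.Set.mem_add]; exact Or.inr (by omega))
          · exact Or.inr ⟨b, by omega, hb2, hb3⟩
  | case3 seen a h =>
    simp only [Bool.false_eq_true, false_iff]
    rintro ⟨x, hx1, hx2, _⟩; omega

lemma alt_iff (c y z : Int) :
    is_right_triangle_alt c y z = true ↔
      ∃ a, min y z ≤ a ∧ a ≤ max y z ∧
        ∃ b, min y z ≤ b ∧ b ≤ max y z ∧ a * a + b * b = c * c := by
  unfold is_right_triangle_alt
  rw [pvAltLoop_iff]
  constructor
  · rintro ⟨x, hx1, hx2, hm | ⟨b, hb1, hb2, hb3⟩⟩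
    · exact absurd hm (List.not_mem_nil)
    · exact ⟨x, hx1, hx2, b, hb1, by omega, by omega⟩
  · rintro ⟨a, ha1, ha2, b, hb1, hb2, hb3⟩
    -- wlog b ≤ a: the pair with the larger leg as x
    rcases le_total b a with hba | hab
    · exact ⟨a, ha1, ha2, Or.inr ⟨b, hb1, hba, by omega⟩⟩
    · exact ⟨b, hb1, hb2, Or.inr ⟨a, ha1, hab, by omega⟩⟩

-- ===== VERDICT =====
theorem is_right_triangle_spec : Claim_equal_is_right_triangle := by
  intro c y z _
  unfold Spec_is_right_triangle
  rw [Bool.eq_iff_iff, alt_iff]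
  unfold is_right_triangle
  simp only [pvLoopA_iff]
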